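-- pv_equiv track=rewrite | github.com/calebguo007/asm-spec | experiments/mcp_value_metadata_audit.py | structured_hit
-- ===== SOURCE A (Python) =====
-- STRUCTURED_KEYS = {
--     "pricing": {"pricing", "price", "cost", "billing", "plans", "quota", "credits"},
--     "sla_rate_limit": {"sla", "latency", "uptime", "rate_limit", "rateLimit", "timeout", "qps"},
--     "quality_benchmark": {"quality", "benchmark", "score", "rating", "rank", "leaderboard", "evaluation"},
--     "payment": {"payment", "checkout", "billing", "subscription", "marketplace"},
--     "provenance": {
--         "url",
--         "repository",
--         "github",
--         "version",
--         "license",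
--         "author_name",
--         "publisher",
--         "publishedAt",
--         "updatedAt",
--         "last_commit",
--     },
--     "security_trust": {
--         "security",
--         "auth",
--         "oauth",
--         "api_key",
--         "apiKey",
--         "environmentVariablesJsonSchema",
--         "license",
--         "archived",
--     },
-- }
--
-- def structured_hit(value_class: str, keys: set[str]) -> bool:
--     wanted = STRUCTURED_KEYS[value_class]
--     normalized = {key.lower().replace("-", "_") for key in keys}
--     for wanted_key in wanted:
--         wk = wanted_key.lower().replace("-", "_")
--         if wk in normalized:
--             return True
--         if any(key.endswith("." + wk) for key in normalized):
--             return True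
--     return False
-- ===== SOURCE B (Python) =====
-- STRUCTURED_KEYS = {
--     "pricing": {"pricing", "price", "cost", "billing", "plans", "quota", "credits"},
--     "sla_rate_limit": {"sla", "latency", "uptime", "rate_limit", "rateLimit", "timeout", "qps"},
--     "quality_benchmark": {"quality", "benchmark", "score", "rating", "rank", "leaderboard", "evaluation"},
--     "payment": {"payment", "checkout", "billing", "subscription", "marketplace"},
--     "provenance": {
--         "url",
--         "repository",
--         "github",
--         "version",
--         "license",
--         "author_name",
--         "publisher",
--         "publishedAt",
--         "updatedAt",
--         "last_commit",
--     },
--     "security_trust": {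
--         "security",
--         "auth",
--         "oauth",
--         "api_key",
--         "apiKey",
--         "environmentVariablesJsonSchema",
--         "license",
--         "archived",
--     },
-- }
--
--
-- def structured_hit(value_class: str, keys: set[str]) -> bool:
--     # Build a token index once: each normalized key, plus its segment after the
--     # final '.' when it contains one; then a single set-intersection test.
--     wanted = {wk.lower().replace("-", "_") for wk in STRUCTURED_KEYS[value_class]}
--     tokens = set()
--     for key in keys:
--         k = key.lower().replace("-", "_")
--         tokens.add(k)
--         if "." in k:
--             tokens.add(k.rsplit(".", 1)[-1])
--     return not wanted.isdisjoint(tokens)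
-- ===== Notes on version B (the rewrite author's own statement) =====
-- stated objective: alternative
-- what changed: Replaces the nested per-wanted-key scan (membership test plus an endswith pass over all keys for each wanted key) with a one-time suffix-token index built from the keys (each normalized key plus its segment after the final dot) followed by a single flat set-disjointness test.
import Mathlib
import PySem

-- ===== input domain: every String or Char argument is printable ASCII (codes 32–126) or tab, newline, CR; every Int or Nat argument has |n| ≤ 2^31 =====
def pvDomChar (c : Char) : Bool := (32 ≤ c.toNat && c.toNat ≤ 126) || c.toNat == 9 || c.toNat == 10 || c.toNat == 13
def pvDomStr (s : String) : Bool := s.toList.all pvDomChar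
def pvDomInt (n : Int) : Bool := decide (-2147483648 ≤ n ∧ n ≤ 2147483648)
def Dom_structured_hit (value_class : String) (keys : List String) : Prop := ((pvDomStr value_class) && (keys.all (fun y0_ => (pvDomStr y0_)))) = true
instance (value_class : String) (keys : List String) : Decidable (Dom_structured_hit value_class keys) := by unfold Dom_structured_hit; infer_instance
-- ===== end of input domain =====

-- B builds a suffix-token index of the normalized keys once and tests set disjointness,
-- replacing A's nested per-wanted-key endswith scan (objective: alternative).

-- shared module constant STRUCTURED_KEYS: value_class ↦ its wanted set (set literal, as a distinct-element list)
def pvWanted? (value_class : String) : Option (List String) :=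
  if value_class = "pricing" then
    some ["pricing", "price", "cost", "billing", "plans", "quota", "credits"]
  else if value_class = "sla_rate_limit" then
    some ["sla", "latency", "uptime", "rate_limit", "rateLimit", "timeout", "qps"]
  else if value_class = "quality_benchmark" then
    some ["quality", "benchmark", "score", "rating", "rank", "leaderboard", "evaluation"]
  else if value_class = "payment" then
    some ["payment", "checkout", "billing", "subscription", "marketplace"]
  else if value_class = "provenance" then
    some ["url", "repository", "github", "version", "license", "author_name", "publisher",
          "publishedAt", "updatedAt", "last_commit"]
  else if value_class = "security_trust" then
    some ["security", "auth", "oauth", "api_key", "apiKey", "environmentVariablesJsonSchema",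
          "license", "archived"]
  else none

-- key.lower().replace("-", "_")
def pvNorm (s : String) : String := PySem.Str.replace (PySem.Str.lower s) "-" "_"

-- ===== PORT A =====
-- the 'for wanted_key in wanted' loop (its Bool result is order-independent, so the literal's order is fine)

def pvLoopA (normalized : PySem.Set String) : List String → Bool
  | [] => false
  | w :: rest =>
    let wk := pvNorm w
    if PySem.Set.contains normalized wk then true
    else if normalized.any (fun key => PySem.Str.endswith key ("." ++ wk)) then true
    else pvLoopA normalized rest

def structured_hit (value_class : String) (keys : List String) : Bool :=
  match pvWanted? value_class with
  | none => false   -- Python raises KeyError here; excluded by Pre_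
  | some wanted =>
    let normalized : PySem.Set String := PySem.Set.ofList (keys.map pvNorm)
    pvLoopA normalized wanted

-- ===== PORT B =====
-- k.rsplit(".", 1)[-1]: the segment after the last '.', or k itself if there is none (hand port, exact)
def pvLastSeg (s : String) : String := String.ofList ((s.toList.reverse.takeWhile (· ≠ '.')).reverse)

-- the token-index loop of Source B
def pvTokens (keys : List String) : PySem.Set String :=
  keys.foldl (fun t key =>
    let k := pvNorm key
    let t := PySem.Set.add t k
    if PySem.Str.isIn "." k then PySem.Set.add t (pvLastSeg k) else t) PySem.Set.empty

def structured_hit_alt (value_class : String) (keys : List String) : Bool :=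
  match pvWanted? value_class with
  | none => false   -- Python raises KeyError here; excluded by Pre_
  | some ws =>
    let wanted : PySem.Set String := PySem.Set.ofList (ws.map pvNorm)
    !(PySem.Set.isdisjoint wanted (pvTokens keys))


-- ===== PRECONDITION & SPEC =====
-- Pre_ excludes exactly the value_class strings that are not among the six STRUCTURED_KEYS names,
-- on which the Python A raises KeyError.
def Pre_structured_hit (value_class : String) (keys : List String) : Prop :=
  value_class ∈ ["pricing", "sla_rate_limit", "quality_benchmark", "payment", "provenance", "security_trust"]
instance (value_class : String) (keys : List String) : Decidable (Pre_structured_hit value_class keys) := by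
  unfold Pre_structured_hit; infer_instance

def pvWitness_structured_hit : String × List String := ("pricing", ["api.price", "Foo-Bar"])

def Spec_structured_hit (value_class : String) (keys : List String) (out : Bool) : Prop := out = structured_hit_alt value_class keys
instance (value_class : String) (keys : List String) (out : Bool) : Decidable (Spec_structured_hit value_class keys out) := by unfold Spec_structured_hit; infer_instance

-- ===== CLAIM (what is proved, stated in full; the proofs are below) =====
def Claim_equal_structured_hit : Prop := ∀ (value_class : String) (keys : List String), Dom_structured_hit value_class keys → Pre_structured_hit value_class keys → Spec_structured_hit value_class keys (structured_hit value_class keys)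

-- ===== LEMMAS AND PROOFS =====

lemma pvWanted_dotless (vc : String) (ws : List String) (h : pvWanted? vc = some ws) :
    ∀ w ∈ ws, '.' ∉ (pvNorm w).toList := by
  unfold pvWanted? at h
  split_ifs at h <;> simp only [Option.some.injEq] at h <;> subst h <;> decide

lemma singleton_infix_iff {a : Char} {l : List Char} : [a] <:+: l ↔ a ∈ l := by
  constructor
  · intro h; exact List.singleton_sublist.mp h.sublist
  · intro h
    obtain ⟨s, t, rfl⟩ := List.append_of_mem h
    exact ⟨s, t, by simp⟩

lemma pref_aux (v : List Char) (hv : '.' ∉ v) (r : List Char) :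
    (v ++ ['.']) <+: r ↔ ('.' ∈ r ∧ r.takeWhile (· ≠ '.') = v) := by
  induction v generalizing r with
  | nil =>
    cases r with
    | nil => simp
    | cons c t =>
      by_cases hc : c = '.'
      · subst hc; simp
      · simp [List.cons_prefix_cons, hc, Ne.symm hc]
  | cons a v ih =>
    have ha : a ≠ '.' := by intro h; exact hv (h ▸ List.mem_cons_self)
    have hv' : '.' ∉ v := fun h => hv (List.mem_cons_of_mem _ h)
    cases r with
    | nil => simp
    | cons c t =>
      by_cases hc : c = a
      · subst hc
        simp [List.cons_prefix_cons, ha, Ne.symm ha, ih hv' t]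
      · by_cases hcd : c = '.'
        · subst hcd
          simp [List.cons_prefix_cons, hc]
          exact fun h => absurd h ha
        · simp [List.cons_prefix_cons, hcd, hc, Ne.symm hc]

lemma suffix_dot_iff (wk k : List Char) (hw : '.' ∉ wk) :
    ('.' :: wk) <:+ k ↔ ('.' ∈ k ∧ (k.reverse.takeWhile (· ≠ '.')).reverse = wk) := by
  rw [← List.reverse_prefix]
  have h : ('.' :: wk).reverse = wk.reverse ++ ['.'] := by simp
  rw [h, pref_aux wk.reverse (by simpa using hw) k.reverse]
  constructor
  · rintro ⟨h1, h2⟩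
    exact ⟨by simpa using h1, by rw [h2]; simp⟩
  · rintro ⟨h1, h2⟩
    refine ⟨by simpa using h1, ?_⟩
    have := congrArg List.reverse h2
    simpa using this

lemma elem_bridge (wk k : String) (hw : '.' ∉ wk.toList) :
    (k = wk ∨ PySem.Str.endswith k ("." ++ wk) = true) ↔
    (wk = k ∨ (PySem.Str.isIn "." k = true ∧ wk = pvLastSeg k)) := by
  have e1 : PySem.Str.endswith k ("." ++ wk) = true ↔ ('.' :: wk.toList) <:+ k.toList := by
    rw [PySem.Str.endswith_eq, PySem.Chars.endswith_iff]
    simp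
  have e2 : PySem.Str.isIn "." k = true ↔ '.' ∈ k.toList := by
    rw [PySem.Str.isIn_iff_infix]
    simpa using (singleton_infix_iff (a := '.') (l := k.toList))
  have e3 : wk = pvLastSeg k ↔ (k.toList.reverse.takeWhile (· ≠ '.')).reverse = wk.toList := by
    unfold pvLastSeg
    rw [← String.toList_inj]
    simp [eq_comm]
  rw [e1, e2, e3, suffix_dot_iff _ _ hw]
  constructor
  · rintro (h | h)
    · exact Or.inl h.symm
    · exact Or.inr h
  · rintro (h | h)
    · exact Or.inl h.symm
    · exact Or.inr h

lemma mem_tokens_aux (x : String) (ks : List String) : ∀ (t : PySem.Set String),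
      x ∈ ks.foldl (fun t key =>
        let k := pvNorm key
        let t := PySem.Set.add t k
        if PySem.Str.isIn "." k then PySem.Set.add t (pvLastSeg k) else t) t ↔
      (x ∈ t ∨ ∃ key ∈ ks, (x = pvNorm key ∨
        (PySem.Str.isIn "." (pvNorm key) = true ∧ x = pvLastSeg (pvNorm key)))) := by
    induction ks with
    | nil => simp
    | cons key rest ih =>
      intro t
      rw [List.foldl_cons]
      rw [ih]
      cases hI : PySem.Str.isIn "." (pvNorm key) with
      | true =>
        simp only [hI, if_true, PySem.Set.mem_add, List.mem_cons]
        constructor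
        · rintro (((h1 | h1) | h1) | ⟨key', hk', hd⟩)
          · exact Or.inl h1
          · exact Or.inr ⟨key, Or.inl rfl, Or.inl h1⟩
          · exact Or.inr ⟨key, Or.inl rfl, Or.inr ⟨hI, h1⟩⟩
          · exact Or.inr ⟨key', Or.inr hk', hd⟩
        · rintro (h1 | ⟨key', hk', hd⟩)
          · exact Or.inl (Or.inl (Or.inl h1))
          · rcases hk' with rfl | hk'
            · rcases hd with hd | hd
              · exact Or.inl (Or.inl (Or.inr hd))
              · exact Or.inl (Or.inr hd.2)
            · exact Or.inr ⟨key', hk', hd⟩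
      | false =>
        simp only [hI, if_false, PySem.Set.mem_add, List.mem_cons, Bool.false_eq_true]
        constructor
        · rintro ((h1 | h1) | ⟨key', hk', hd⟩)
          · exact Or.inl h1
          · exact Or.inr ⟨key, Or.inl rfl, Or.inl h1⟩
          · exact Or.inr ⟨key', Or.inr hk', hd⟩
        · rintro (h1 | ⟨key', hk', hd⟩)
          · exact Or.inl (Or.inl h1)
          · rcases hk' with rfl | hk'
            · rcases hd with hd | hd
              · exact Or.inl (Or.inr hd)
              · exact absurd hd.1 (by rw [hI]; exact Bool.false_ne_true)
            · exact Or.inr ⟨key', hk', hd⟩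

lemma mem_tokens (keys : List String) (x : String) :
    x ∈ pvTokens keys ↔
      ∃ key ∈ keys, (x = pvNorm key ∨
        (PySem.Str.isIn "." (pvNorm key) = true ∧ x = pvLastSeg (pvNorm key))) := by
  rw [pvTokens, mem_tokens_aux x keys PySem.Set.empty]
  simp [PySem.Set.empty]

lemma loopA_eq (normalized : PySem.Set String) (ws : List String) :
    pvLoopA normalized ws = ws.any (fun w =>
      PySem.Set.contains normalized (pvNorm w) ||
      normalized.any (fun key => PySem.Str.endswith key ("." ++ pvNorm w))) := by
  induction ws with
  | nil => rfl
  | cons w rest ih =>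
    rw [List.any_cons, ← ih]
    simp only [pvLoopA]
    cases h1 : PySem.Set.contains normalized (pvNorm w) with
    | true => simp only [h1, if_true, Bool.true_or, eq_self_iff_true, if_pos]
    | false =>
      cases h2 : normalized.any (fun key => PySem.Str.endswith key ("." ++ pvNorm w)) with
      | true => simp [h1, h2]
      | false => simp [h1, h2]

lemma not_disjoint_iff (S T : PySem.Set String) :
    (!(PySem.Set.isdisjoint S T)) = true ↔ ∃ x ∈ S, x ∈ T := by
  cases hd : PySem.Set.isdisjoint S T with
  | true =>
    simp only [Bool.not_true, Bool.false_eq_true, false_iff]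
    rintro ⟨x, hx, hxT⟩
    exact ((PySem.Set.isdisjoint_iff _ _).mp hd) x hx hxT
  | false =>
    simp only [Bool.not_false, true_iff]
    by_contra hc
    push_neg at hc
    rw [(PySem.Set.isdisjoint_iff _ _).mpr (fun x hx hxT => hc x hx hxT)] at hd
    simp at hd

lemma ports_eq (vc : String) (keys : List String) :
    structured_hit vc keys = structured_hit_alt vc keys := by
  unfold structured_hit structured_hit_alt
  cases h : pvWanted? vc with
  | none => rfl
  | some ws =>
    have hws := pvWanted_dotless vc ws h
    show pvLoopA (PySem.Set.ofList (keys.map pvNorm)) ws =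
      !(PySem.Set.isdisjoint (PySem.Set.ofList (ws.map pvNorm)) (pvTokens keys))
    rw [Bool.eq_iff_iff, loopA_eq, List.any_eq_true, not_disjoint_iff]
    constructor
    · rintro ⟨w, hwmem, hpred⟩
      rw [Bool.or_eq_true] at hpred
      refine ⟨pvNorm w, (PySem.Set.mem_ofList _ _).mpr (List.mem_map.mpr ⟨w, hwmem, rfl⟩), ?_⟩
      rw [mem_tokens]
      rcases hpred with hc | ha
      · rw [PySem.Set.contains_iff, PySem.Set.mem_ofList, List.mem_map] at hc
        obtain ⟨key, hk, he⟩ := hc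
        exact ⟨key, hk, Or.inl he.symm⟩
      · rw [List.any_eq_true] at ha
        obtain ⟨k, hk, he⟩ := ha
        rw [PySem.Set.mem_ofList, List.mem_map] at hk
        obtain ⟨key, hkey, rfl⟩ := hk
        rcases (elem_bridge (pvNorm w) (pvNorm key) (hws w hwmem)).mp (Or.inr he) with h' | h'
        · exact ⟨key, hkey, Or.inl h'⟩
        · exact ⟨key, hkey, Or.inr h'⟩
    · rintro ⟨x, hxw, hxt⟩
      rw [PySem.Set.mem_ofList, List.mem_map] at hxw
      obtain ⟨w, hwmem, rfl⟩ := hxw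
      refine ⟨w, hwmem, ?_⟩
      rw [Bool.or_eq_true]
      rw [mem_tokens] at hxt
      obtain ⟨key, hkey, hdisj⟩ := hxt
      rcases (elem_bridge (pvNorm w) (pvNorm key) (hws w hwmem)).mpr hdisj with h' | h'
      · left
        rw [PySem.Set.contains_iff, PySem.Set.mem_ofList, List.mem_map]
        exact ⟨key, hkey, h'⟩
      · right
        rw [List.any_eq_true]
        exact ⟨pvNorm key, (PySem.Set.mem_ofList _ _).mpr (List.mem_map.mpr ⟨key, hkey, rfl⟩), h'⟩

-- ===== VERDICT (by name: the statement is the Claim_ definition above) =====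
theorem structured_hit_spec : Claim_equal_structured_hit := by
  intro value_class keys _ _
  exact ports_eq value_class keys
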